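-- pv_equiv track=rewrite | github.com/pedrofariacomposer/comptools | build/lib/comptools/basic_tools.py | index_vector
-- ===== SOURCE A (Python) =====
-- from typing import Dict, Sequence, List
--
-- def index_vector(
--     pcset: Sequence,
-- ) -> List:
--
--     """Returns the index vector of a pitch class set.
--     """
--
--     all_sums = [[x, y] for x in pcset for y in pcset if x <= y]
--     vector = [0] * 12
--     for i in all_sums:
--         soma = sum(i) % 12
--         if len(set(i)) == 1:
--             vector[soma] += 1
--         else:
--             vector[soma] += 2
--     return vector
-- ===== SOURCE B (Python) =====
-- from typing import Sequence, List
--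
-- def index_vector(
--     pcset: Sequence,
-- ) -> List:
--     """Returns the index vector of a pitch class set.
--
--     Histogram of residues mod 12, then a 12x12 convolution of the counts:
--     O(n + 144) instead of scanning all pairs.
--     """
--     counts = [0] * 12
--     for x in pcset:
--         counts[x % 12] += 1
--     vector = [0] * 12
--     for a in range(12):
--         for b in range(12):
--             vector[(a + b) % 12] += counts[a] * counts[b]
--     return vector
-- ===== Notes on version B (the rewrite author's own statement) =====
-- stated objective: faster
-- what changed: Replaces the scan over all O(n^2) value pairs (with a <=-filter and per-pair set-size weights) by a 12-bucket residue histogram followed by a fixed 12x12 convolution of the counts, using the identity that the weighted <=-pairs sum equals the count of all ordered pairs.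
import Mathlib
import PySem

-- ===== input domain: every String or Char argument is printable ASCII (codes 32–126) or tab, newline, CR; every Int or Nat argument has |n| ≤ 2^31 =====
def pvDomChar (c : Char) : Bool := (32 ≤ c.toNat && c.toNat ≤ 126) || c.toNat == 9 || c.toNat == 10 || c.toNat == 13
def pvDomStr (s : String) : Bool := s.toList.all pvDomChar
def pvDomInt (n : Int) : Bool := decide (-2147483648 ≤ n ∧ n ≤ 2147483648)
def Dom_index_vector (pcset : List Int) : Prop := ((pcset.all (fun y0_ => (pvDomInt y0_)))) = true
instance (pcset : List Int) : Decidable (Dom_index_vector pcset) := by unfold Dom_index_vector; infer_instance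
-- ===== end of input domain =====

-- B replaces A's O(n^2) scan over all value pairs by a 12-bucket residue histogram
-- followed by a fixed 12x12 convolution of the counts (objective: faster).

-- ===== PORT A =====
def index_vector (pcset : List Int) : List Int :=
  let all_sums := pcset.flatMap (fun x => (pcset.filter (fun y => decide (x ≤ y))).map (fun y => (x, y)))
  all_sums.foldl (fun vector i =>
    let soma := PySem.Int.mod (i.1 + i.2) 12
    if i.1 = i.2 then
      PySem.List.pySetD vector soma (PySem.List.pyGetD vector soma 0 + 1)
    else
      PySem.List.pySetD vector soma (PySem.List.pyGetD vector soma 0 + 2))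
    (List.replicate 12 0)

-- ===== PORT B =====
def index_vector_alt (pcset : List Int) : List Int :=
  let counts := pcset.foldl (fun c x =>
    PySem.List.pySetD c (PySem.Int.mod x 12) (PySem.List.pyGetD c (PySem.Int.mod x 12) 0 + 1))
    (List.replicate 12 0)
  (PySem.List.pyRange 0 12 1).foldl (fun v a =>
    (PySem.List.pyRange 0 12 1).foldl (fun v b =>
      PySem.List.pySetD v (PySem.Int.mod (a + b) 12)
        (PySem.List.pyGetD v (PySem.Int.mod (a + b) 12) 0 +
          PySem.List.pyGetD counts a 0 * PySem.List.pyGetD counts b 0)) v)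
    (List.replicate 12 0)

-- ===== PRECONDITION & SPEC =====
def Spec_index_vector (pcset : List Int) (out : List Int) : Prop := out = index_vector_alt pcset
instance (pcset : List Int) (out : List Int) : Decidable (Spec_index_vector pcset out) := by unfold Spec_index_vector; infer_instance

-- ===== CLAIM (what is proved, stated in full; the proofs are below) =====
def Claim_equal_index_vector : Prop := ∀ (pcset : List Int), Dom_index_vector pcset → Spec_index_vector pcset (index_vector pcset)

-- ===== LEMMAS AND PROOFS =====

/-- The common shape of all three loops: fold a list of "bump `v[idx p]` by `w p`" updates. -/
def bumpFold {α : Type} (idx : α → Int) (w : α → Int) (ps : List α) (v0 : List Int) : List Int :=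
  ps.foldl (fun v p => PySem.List.pySetD v (idx p) (PySem.List.pyGetD v (idx p) 0 + w p)) v0

/-- Residue count: total weight of elements of `l` with `x % 12 = t`. -/
def cnt (l : List Int) (t : Int) : Int := (l.map (fun x => if x % 12 = t then (1:Int) else 0)).sum

/-- A's list of pairs `[x, y]` with `x <= y`. -/
def allSums (l : List Int) : List (Int × Int) :=
  l.flatMap (fun x => (l.filter (fun y => decide (x ≤ y))).map (fun y => (x, y)))

/-- B's histogram loop, in `bumpFold` form. -/
def countsL (l : List Int) : List Int := bumpFold (fun x => x % 12) (fun _ => 1) l (List.replicate 12 0)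

/-- B's double loop index set, flattened. -/
def pairsL : List (Int × Int) :=
  (PySem.List.pyRange 0 12 1).flatMap (fun a => (PySem.List.pyRange 0 12 1).map (fun b => (a, b)))

lemma bumpFold_spec {α : Type} (idx : α → Int) (w : α → Int)
    (hidx : ∀ p, 0 ≤ idx p ∧ idx p < 12) (ps : List α) :
    ∀ (v0 : List Int), v0.length = 12 →
      (bumpFold idx w ps v0).length = 12 ∧
      ∀ k : Nat, k < 12 →
        (bumpFold idx w ps v0).getD k 0 =
          v0.getD k 0 + (ps.map (fun p => if idx p = (k : Int) then w p else 0)).sum := by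
  induction ps with
  | nil => intro v0 h; simpa [bumpFold] using h
  | cons p ps ih =>
    intro v0 h
    obtain ⟨h0, h1⟩ := hidx p
    have hlt : (idx p).toNat < v0.length := by omega
    have hstep : bumpFold idx w (p :: ps) v0 =
        bumpFold idx w ps (v0.set (idx p).toNat (v0.getD (idx p).toNat 0 + w p)) := by
      simp only [bumpFold, List.foldl_cons]
      rw [PySem.List.pySetD_of_nonneg _ _ h0,
        PySem.List.pyGetD_eq_getElem _ _ h0 (by omega), List.getD_eq_getElem _ _ hlt]
    have hlen : (v0.set (idx p).toNat (v0.getD (idx p).toNat 0 + w p)).length = 12 := by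
      simp [h]
    obtain ⟨ihl, ihg⟩ := ih _ hlen
    rw [hstep]
    refine ⟨ihl, fun k hk => ?_⟩
    rw [ihg k hk]
    have hset : (v0.set (idx p).toNat (v0.getD (idx p).toNat 0 + w p)).getD k 0 =
        if (idx p).toNat = k then v0.getD (idx p).toNat 0 + w p else v0.getD k 0 := by
      simp only [List.getD, List.getElem?_set, hlt]
      split_ifs <;> simp
    rw [hset]
    simp only [List.map_cons, List.sum_cons]
    by_cases hek : idx p = (k : Int)
    · simp [hek]
      omega
    · have hne : (idx p).toNat ≠ k := by omega
      simp [hek, hne]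

lemma sum_filter_if {α : Type} (l : List α) (p : α → Bool) (f : α → Int) :
    ((l.filter p).map f).sum = (l.map (fun y => if p y = true then f y else 0)).sum := by
  induction l with
  | nil => simp
  | cons x l ih =>
    by_cases h : p x = true <;> simp [h, ih]

lemma sum_flatMap_map {α β : Type} (l : List α) (g : α → List β) (t : β → Int) :
    (((l.flatMap g)).map t).sum = (l.map (fun x => ((g x).map t).sum)).sum := by
  induction l with
  | nil => simp
  | cons x l ih => simp [List.flatMap_cons, ih]

lemma sum_swap {α β : Type} (l1 : List α) (l2 : List β) (F : α → β → Int) :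
    (l1.map (fun x => (l2.map (fun y => F x y)).sum)).sum =
    (l2.map (fun y => (l1.map (fun x => F x y)).sum)).sum := by
  induction l1 with
  | nil => simp
  | cons x l1 ih =>
    simp only [List.map_cons, List.sum_cons, ih, ← PySem.List.sum_map_add_int]

lemma sum_point (g : Int → Int) :
    ∀ (n : Nat) (r : Int), 0 ≤ r → r < n →
      ((List.range n).map (fun a : Nat => (if r = (a:Int) then (1:Int) else 0) * g a)).sum = g r := by
  intro n
  induction n with
  | zero => intro r h0 h1; omega
  | succ n ih =>
    intro r h0 h1
    rw [List.range_succ]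
    by_cases h : r = (n : Int)
    · have hz : ((List.range n).map (fun a : Nat => (if r = (a:Int) then (1:Int) else 0) * g a)).sum = 0 := by
        apply List.sum_eq_zero
        intro x hx
        simp only [List.mem_map, List.mem_range] at hx
        obtain ⟨a, ha, rfl⟩ := hx
        have : r ≠ (a : Int) := by omega
        simp [this]
      rw [List.map_append, List.sum_append, hz]
      simp [h]
    · have h1' : r < (n : Int) := by omega
      rw [List.map_append, List.sum_append, ih r h0 h1']
      simp [h]

lemma count_sum (l : List Int) (g : Int → Int) :
    (l.map (fun x => g (x % 12))).sum =
    ((List.range 12).map (fun a : Nat => cnt l a * g a)).sum := by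
  induction l with
  | nil => simp [cnt]
  | cons x l ih =>
    have hc : ∀ a : Int, cnt (x :: l) a = (if x % 12 = a then (1:Int) else 0) + cnt l a := by
      intro a; simp [cnt]
    simp only [List.map_cons, List.sum_cons, ih]
    have : ((List.range 12).map (fun a : Nat => cnt (x :: l) a * g a)).sum =
        ((List.range 12).map (fun a : Nat => (if x % 12 = (a:Int) then (1:Int) else 0) * g a)).sum +
        ((List.range 12).map (fun a : Nat => cnt l a * g a)).sum := by
      rw [← PySem.List.sum_map_add_int]
      apply congrArg
      apply List.map_congr_left
      intro a _
      rw [hc a, add_mul]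
    rw [this, sum_point g 12 (x % 12) (Int.emod_nonneg x (by norm_num)) (Int.emod_lt_of_pos x (by norm_num))]

lemma ptF (S x y : Int) :
    (if x ≤ y then (if (x + y) % 12 = S then (if x = y then (1:Int) else 2) else 0) else 0) +
    (if y ≤ x then (if (y + x) % 12 = S then (if y = x then (1:Int) else 2) else 0) else 0) =
    2 * (if (x + y) % 12 = S then (1:Int) else 0) := by
  rw [show y + x = x + y from add_comm y x]
  rcases lt_trichotomy x y with h | h | h <;> split_ifs <;> omega

lemma sym_gen (F χ : Int → Int → Int) (l : List Int)
    (pt : ∀ x y, F x y + F y x = 2 * χ x y) :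
    (l.map (fun x => (l.map (fun y => F x y)).sum)).sum =
    (l.map (fun x => (l.map (fun y => χ x y)).sum)).sum := by
  have key : (l.map (fun x => (l.map (fun y => F x y + F y x)).sum)).sum
      = (l.map (fun x => (l.map (fun y => 2 * χ x y)).sum)).sum := by
    congr 1
    apply List.map_congr_left
    intro x _
    congr 1
    apply List.map_congr_left
    intro y _
    exact pt x y
  have e1 : ∀ x, (l.map (fun y => F x y + F y x)).sum
      = (l.map (fun y => F x y)).sum + (l.map (fun y => F y x)).sum := by
    intro x; exact PySem.List.sum_map_add_int l _ _
  have e2 : ∀ x, (l.map (fun y => 2 * χ x y)).sum = 2 * (l.map (fun y => χ x y)).sum := by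
    intro x; exact List.sum_map_mul_left l _ 2
  simp only [e1, e2] at key
  rw [PySem.List.sum_map_add_int, List.sum_map_mul_left, sum_swap l l (fun x y => F y x)] at key
  omega

lemma main_sum (l : List Int) (k : Nat) :
    (l.map (fun x => (l.map (fun y =>
        if x ≤ y then (if (x + y) % 12 = (k:Int) then (if x = y then (1:Int) else 2) else 0) else 0)).sum)).sum =
    ((List.range 12).map (fun a : Nat => ((List.range 12).map (fun b : Nat =>
        if ((a:Int) + (b:Int)) % 12 = (k:Int) then cnt l a * cnt l b else 0)).sum)).sum := by
  rw [sym_gen _ (fun x y => if (x + y) % 12 = (k:Int) then (1:Int) else 0) l (ptF (k:Int))]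
  have step1 : (l.map (fun x => (l.map (fun y => if (x + y) % 12 = (k:Int) then (1:Int) else 0)).sum)).sum
      = (l.map (fun x => (l.map (fun y => if (x % 12 + y % 12) % 12 = (k:Int) then (1:Int) else 0)).sum)).sum := by
    congr 1
    apply List.map_congr_left
    intro x _
    congr 1
    apply List.map_congr_left
    intro y _
    rw [← Int.add_emod]
  rw [step1]
  have houter := count_sum l (fun a => (l.map (fun y => if (a + y % 12) % 12 = (k:Int) then (1:Int) else 0)).sum)
  beta_reduce at houter
  rw [houter]
  congr 1
  apply List.map_congr_left
  intro a _
  have hinner := count_sum l (fun t => if ((a:Int) + t) % 12 = (k:Int) then (1:Int) else 0)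
  beta_reduce at hinner
  rw [hinner, ← List.sum_map_mul_left]
  congr 1
  apply List.map_congr_left
  intro b _
  split_ifs <;> ring

lemma hmod12 : ∀ z : Int, 0 ≤ z % 12 ∧ z % 12 < 12 := by
  intro z
  exact ⟨Int.emod_nonneg z (by norm_num), Int.emod_lt_of_pos z (by norm_num)⟩

lemma A_eq_bump (l : List Int) :
    index_vector l = bumpFold (fun p : Int × Int => (p.1 + p.2) % 12)
      (fun p => if p.1 = p.2 then (1:Int) else 2) (allSums l) (List.replicate 12 0) := by
  have h1 : index_vector l = (allSums l).foldl (fun vector i =>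
      let soma := PySem.Int.mod (i.1 + i.2) 12
      if i.1 = i.2 then
        PySem.List.pySetD vector soma (PySem.List.pyGetD vector soma 0 + 1)
      else
        PySem.List.pySetD vector soma (PySem.List.pyGetD vector soma 0 + 2))
      (List.replicate 12 0) := rfl
  rw [h1]
  unfold bumpFold
  have hf : (fun (vector : List Int) (i : Int × Int) =>
      let soma := PySem.Int.mod (i.1 + i.2) 12
      if i.1 = i.2 then
        PySem.List.pySetD vector soma (PySem.List.pyGetD vector soma 0 + 1)
      else
        PySem.List.pySetD vector soma (PySem.List.pyGetD vector soma 0 + 2)) =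
      (fun (v : List Int) (p : Int × Int) =>
        PySem.List.pySetD v ((p.1 + p.2) % 12)
          (PySem.List.pyGetD v ((p.1 + p.2) % 12) 0 + (if p.1 = p.2 then (1:Int) else 2))) := by
    funext v p
    by_cases h : p.1 = p.2 <;>
      simp [h]
  rw [hf]

lemma counts_eq (l : List Int) :
    l.foldl (fun c x =>
      PySem.List.pySetD c (PySem.Int.mod x 12) (PySem.List.pyGetD c (PySem.Int.mod x 12) 0 + 1))
      (List.replicate 12 0) = countsL l := by
  unfold countsL bumpFold
  have hf : (fun (c : List Int) (x : Int) =>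
      PySem.List.pySetD c (PySem.Int.mod x 12) (PySem.List.pyGetD c (PySem.Int.mod x 12) 0 + 1)) =
      (fun (v : List Int) (p : Int) =>
        PySem.List.pySetD v (p % 12) (PySem.List.pyGetD v (p % 12) 0 + 1)) := by
    funext c x
    simp
  rw [hf]

lemma B_eq_bump (l : List Int) :
    index_vector_alt l = bumpFold (fun p : Int × Int => (p.1 + p.2) % 12)
      (fun p => PySem.List.pyGetD (countsL l) p.1 0 * PySem.List.pyGetD (countsL l) p.2 0)
      pairsL (List.replicate 12 0) := by
  have h1 : index_vector_alt l = (PySem.List.pyRange 0 12 1).foldl (fun v a =>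
      (PySem.List.pyRange 0 12 1).foldl (fun v b =>
        PySem.List.pySetD v (PySem.Int.mod (a + b) 12)
          (PySem.List.pyGetD v (PySem.Int.mod (a + b) 12) 0 +
            PySem.List.pyGetD (countsL l) a 0 * PySem.List.pyGetD (countsL l) b 0)) v)
      (List.replicate 12 0) := by
    unfold index_vector_alt
    rw [counts_eq]
  rw [h1]
  unfold bumpFold pairsL
  rw [List.foldl_flatMap]
  have hf : (fun (acc : List Int) (a : Int) =>
      List.foldl (fun v p =>
        PySem.List.pySetD v ((p.1 + p.2) % 12)
          (PySem.List.pyGetD v ((p.1 + p.2) % 12) 0 +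
            PySem.List.pyGetD (countsL l) p.1 0 * PySem.List.pyGetD (countsL l) p.2 0)) acc
        ((PySem.List.pyRange 0 12 1).map (fun b => (a, b)))) =
      (fun (v : List Int) (a : Int) =>
        (PySem.List.pyRange 0 12 1).foldl (fun v b =>
          PySem.List.pySetD v (PySem.Int.mod (a + b) 12)
            (PySem.List.pyGetD v (PySem.Int.mod (a + b) 12) 0 +
              PySem.List.pyGetD (countsL l) a 0 * PySem.List.pyGetD (countsL l) b 0)) v) := by
    funext v a
    rw [List.foldl_map]
    have : (fun (x : List Int) (y : Int) =>
        PySem.List.pySetD x ((a + y) % 12)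
          (PySem.List.pyGetD x ((a + y) % 12) 0 +
            PySem.List.pyGetD (countsL l) a 0 * PySem.List.pyGetD (countsL l) y 0)) =
        (fun (v : List Int) (b : Int) =>
          PySem.List.pySetD v (PySem.Int.mod (a + b) 12)
            (PySem.List.pyGetD v (PySem.Int.mod (a + b) 12) 0 +
              PySem.List.pyGetD (countsL l) a 0 * PySem.List.pyGetD (countsL l) b 0)) := by
      funext v b
      simp
    rw [this]
  rw [hf]

lemma counts_spec (l : List Int) :
    (countsL l).length = 12 ∧ ∀ a : Nat, a < 12 → (countsL l).getD a 0 = cnt l (a:Int) := by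
  obtain ⟨h1, h2⟩ := bumpFold_spec (fun x : Int => x % 12) (fun _ => (1:Int))
    (fun x => hmod12 x) l (List.replicate 12 0) (by simp)
  refine ⟨h1, fun a ha => ?_⟩
  have := h2 a ha
  unfold countsL
  rw [this]
  have hrep : (List.replicate 12 (0:Int)).getD a 0 = 0 := by
    rw [List.getD_eq_getElem _ _ (by simpa using ha), List.getElem_replicate]
  rw [hrep]
  simp [cnt]

lemma A_sum (l : List Int) (k : Nat) :
    ((allSums l).map (fun p => if (p.1 + p.2) % 12 = (k:Int) then (if p.1 = p.2 then (1:Int) else 2) else 0)).sum =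
    (l.map (fun x => (l.map (fun y =>
        if x ≤ y then (if (x + y) % 12 = (k:Int) then (if x = y then (1:Int) else 2) else 0) else 0)).sum)).sum := by
  unfold allSums
  rw [sum_flatMap_map]
  congr 1
  apply List.map_congr_left
  intro x _
  rw [List.map_map, sum_filter_if]
  congr 1
  apply List.map_congr_left
  intro y _
  simp only [Function.comp_apply, decide_eq_true_eq]

lemma sum_pyRange12 (f : Int → Int) :
    ((PySem.List.pyRange 0 12 1).map f).sum = ((List.range 12).map (fun a : Nat => f (a:Int))).sum := by
  rw [PySem.List.pyRange_one, show ((12:Int) - 0).toNat = 12 from by decide, List.map_map]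
  apply congrArg
  apply List.map_congr_left
  intro j _
  simp

lemma B_sum (l : List Int) (k : Nat) :
    (pairsL.map (fun p => if (p.1 + p.2) % 12 = (k:Int) then
        PySem.List.pyGetD (countsL l) p.1 0 * PySem.List.pyGetD (countsL l) p.2 0 else 0)).sum =
    ((List.range 12).map (fun a : Nat => ((List.range 12).map (fun b : Nat =>
        if ((a:Int) + (b:Int)) % 12 = (k:Int) then cnt l a * cnt l b else 0)).sum)).sum := by
  obtain ⟨hlen, hget⟩ := counts_spec l
  unfold pairsL
  rw [sum_flatMap_map]
  have h1 : ∀ a : Int, (((PySem.List.pyRange 0 12 1).map (fun b => (a, b))).map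
      (fun p => if (p.1 + p.2) % 12 = (k:Int) then
        PySem.List.pyGetD (countsL l) p.1 0 * PySem.List.pyGetD (countsL l) p.2 0 else 0)).sum
      = ((List.range 12).map (fun b : Nat => if (a + (b:Int)) % 12 = (k:Int) then
          PySem.List.pyGetD (countsL l) a 0 * PySem.List.pyGetD (countsL l) (b:Int) 0 else 0)).sum := by
    intro a
    rw [List.map_map]
    exact sum_pyRange12 _
  simp only [h1]
  rw [sum_pyRange12]
  apply congrArg
  apply List.map_congr_left
  intro a ha
  have ha12 : a < 12 := by simpa using ha
  apply congrArg
  apply List.map_congr_left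
  intro b hb
  have hb12 : b < 12 := by simpa using hb
  rw [PySem.List.pyGetD_natCast, PySem.List.pyGetD_natCast, hget a ha12, hget b hb12]

-- ===== VERDICT (by name: the statement is the Claim_ definition above) =====
theorem index_vector_spec : Claim_equal_index_vector := by
  intro l _
  unfold Spec_index_vector
  rw [A_eq_bump, B_eq_bump]
  obtain ⟨hlA, hgA⟩ := bumpFold_spec (fun p : Int × Int => (p.1 + p.2) % 12)
      (fun p => if p.1 = p.2 then (1:Int) else 2) (fun p => hmod12 _) (allSums l)
      (List.replicate 12 0) (by simp)
  obtain ⟨hlB, hgB⟩ := bumpFold_spec (fun p : Int × Int => (p.1 + p.2) % 12)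
      (fun p => PySem.List.pyGetD (countsL l) p.1 0 * PySem.List.pyGetD (countsL l) p.2 0)
      (fun p => hmod12 _) pairsL (List.replicate 12 0) (by simp)
  apply List.ext_getElem?
  intro i
  by_cases hi : i < 12
  · have hsome : ∀ (xs : List Int), xs.length = 12 → xs[i]? = some (xs.getD i 0) := by
      intro xs hx
      rw [List.getElem?_eq_getElem (by omega), List.getD_eq_getElem _ _ (by omega)]
    rw [hsome _ hlA, hsome _ hlB, hgA i hi, hgB i hi]
    have hrep : (List.replicate 12 (0:Int)).getD i 0 = 0 := by
      rw [List.getD_eq_getElem _ _ (by simpa using hi), List.getElem_replicate]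
    rw [hrep]
    apply congrArg
    apply congrArg
    beta_reduce
    rw [A_sum l i, B_sum l i]
    exact main_sum l i
  · rw [List.getElem?_eq_none (by omega), List.getElem?_eq_none (by omega)]
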